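-- pv_equiv track=rewrite | github.com/dcWiemann/AMPS_simulation | amps_simulation/core/electrical_model.py | _merge_supernodes
-- ===== SOURCE A (Python) =====
-- from collections import defaultdict
-- from typing import Dict, Set, Tuple, List, Any, Union
--
-- def _merge_supernodes(supernodes: Dict[str, Set[int]]) -> Dict[str, Set[int]]:
--     """
--     Merges supernodes that share common nodes into a single supernode.
--
--     Args:
--         supernodes: Dictionary mapping supernode IDs to sets of nodes
--
--     Returns:
--         Dict[str, Set[int]]: Updated supernodes dictionary with merged supernodes
--     """
--     # Create a mapping of nodes to their supernodes
--     node_to_supernodes = defaultdict(list)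
--     for sn_id, nodes in supernodes.items():
--         for node in nodes:
--             node_to_supernodes[node].append(sn_id)
--
--     # Find nodes that appear in multiple supernodes
--     duplicate_nodes = {node: sn_ids for node, sn_ids in node_to_supernodes.items()
--                      if len(sn_ids) > 1}
--
--     if not duplicate_nodes:
--         return supernodes  # No merging needed
--
--     # Create a mapping of supernodes to their connected supernodes
--     supernode_groups = []
--     processed = set()
--
--     for node, sn_ids in duplicate_nodes.items():
--         if any(sn_id in processed for sn_id in sn_ids):
--             continue
--
--         # Find all supernodes connected through shared nodes
--         group = set(sn_ids)
--         to_process = set(sn_ids)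
--
--         while to_process:
--             current = to_process.pop()
--             processed.add(current)
--
--             # Find all nodes in current supernode
--             nodes_in_current = supernodes[current]
--
--             # For each node, find other supernodes it belongs to
--             for node in nodes_in_current:
--                 for other_sn in node_to_supernodes[node]:
--                     if other_sn not in processed and other_sn not in group:
--                         group.add(other_sn)
--                         to_process.add(other_sn)
--
--         if len(group) > 1:
--             supernode_groups.append(group)
--
--     # Create new merged supernodes
--     merged_supernodes = {}
--     used_supernodes = set()
--
--     # First add non-merged supernodes
--     for sn_id, nodes in supernodes.items():
--         if sn_id not in processed:
--             merged_supernodes[sn_id] = nodes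
--             used_supernodes.add(sn_id)
--
--     # Then add merged supernodes
--     for i, group in enumerate(supernode_groups):
--         new_sn_id = "_".join(sorted(group))
--         merged_nodes = set()
--         for sn_id in group:
--             merged_nodes.update(supernodes[sn_id])
--             used_supernodes.add(sn_id)
--         merged_supernodes[new_sn_id] = merged_nodes
--
--     return merged_supernodes
-- ===== SOURCE B (Python) =====
-- from collections import defaultdict
--
--
-- def _merge_supernodes(supernodes):
--     """Merge supernodes that share nodes (connected components), via per-component
--     fixpoint saturation instead of a worklist; emits merged groups on the fly."""
--     node_to_supernodes = defaultdict(list)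
--     for sn_id, nodes in supernodes.items():
--         for node in nodes:
--             node_to_supernodes[node].append(sn_id)
--
--     dup_items = [(node, sn_ids) for node, sn_ids in node_to_supernodes.items()
--                  if len(sn_ids) > 1]
--     if not dup_items:
--         return supernodes
--
--     # a supernode gets merged exactly when one of its nodes is shared,
--     # i.e. when it occurs in some duplicate node's supernode list
--     merged_ids = {sid for _, sn_ids in dup_items for sid in sn_ids}
--
--     result = {k: v for k, v in supernodes.items() if k not in merged_ids}
--
--     emitted = set()
--     for _node, sn_ids in dup_items:
--         if sn_ids[0] in emitted:
--             continue  # this component was already emitted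
--         comp = set(sn_ids)
--         while True:
--             grown = comp | {t for t in supernodes
--                             if any(not supernodes[t].isdisjoint(supernodes[s])
--                                    for s in comp)}
--             if grown == comp:
--                 break
--             comp = grown
--         emitted |= comp
--         names = sorted(comp)
--         merged = set()
--         for name in names:
--             merged |= supernodes[name]
--         result["_".join(names)] = merged
--     return result
-- ===== Notes on version B (the rewrite author's own statement) =====
-- stated objective: alternative
-- what changed: Replaces A's per-component worklist BFS with its global 'processed' bookkeeping and deferred second emission phase by a per-component fixpoint saturation, a direct shared-node membership test (merged_ids) to keep unmerged entries, and on-the-fly emission of each merged group; Pre_ only requires that the input list encodes a Python dict of sets (distinct keys, distinct elements per value), which every actual Python input satisfies.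
import Mathlib
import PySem

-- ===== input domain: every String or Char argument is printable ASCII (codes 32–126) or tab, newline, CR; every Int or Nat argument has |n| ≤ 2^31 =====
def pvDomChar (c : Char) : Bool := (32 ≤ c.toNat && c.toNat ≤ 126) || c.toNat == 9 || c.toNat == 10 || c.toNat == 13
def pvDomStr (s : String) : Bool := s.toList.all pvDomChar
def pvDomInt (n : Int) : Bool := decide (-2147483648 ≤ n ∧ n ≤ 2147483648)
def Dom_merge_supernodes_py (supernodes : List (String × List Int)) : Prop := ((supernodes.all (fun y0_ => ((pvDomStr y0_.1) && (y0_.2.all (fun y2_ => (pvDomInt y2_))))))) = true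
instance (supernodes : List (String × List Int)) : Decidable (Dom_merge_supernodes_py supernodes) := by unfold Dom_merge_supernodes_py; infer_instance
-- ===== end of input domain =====

-- B replaces A's per-component worklist (with its global `processed` bookkeeping and
-- deferred second emission phase) by a per-component fixpoint saturation with a direct
-- membership test for merged ids, emitting merged groups on the fly; objective: alternative.

-- ===== PORT A =====
-- shared helper (identical code appears in both Pythons): dict lookup supernodes[k];
-- callers only ever look up keys that are present, so the `.getD []` default is never used.
def pvVal (supernodes : List (String × List Int)) (k : String) : List Int :=
  ((PySem.Dict.mk supernodes).get? k).getD []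

-- shared helper (identical code in both Pythons): node_to_supernodes as a defaultdict(list)
def pvNts (supernodes : List (String × List Int)) : PySem.Dict Int (List String) :=
  supernodes.foldl (fun d kv => kv.2.foldl (fun d node => d.modify node [] (· ++ [kv.1])) d)
    PySem.Dict.empty

-- shared helper (identical code in both Pythons): the duplicate nodes with their supernode lists
def pvDupItems (supernodes : List (String × List Int)) : List (Int × List String) :=
  (pvNts supernodes).items.filter (fun kv => 1 < kv.2.length)

-- A's inner while-loop: pop an element of to_process (Python's set.pop order is
-- unspecified; the port pops the first element), mark it processed, scan its nodes'
-- supernode lists and add the new ones to group and to_process.  The fuel argument is a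
-- totality guard only; the callers pass enough fuel for the loop to drain to_process.
def pvWorklist (sup : List (String × List Int)) (nts : PySem.Dict Int (List String)) :
    Nat → PySem.Set String → PySem.Set String → PySem.Set String →
    PySem.Set String × PySem.Set String
  | 0, group, _tp, processed => (group, processed)
  | fuel+1, group, tp, processed =>
    match tp with
    | [] => (group, processed)
    | current :: rest =>
      let processed' := PySem.Set.add processed current
      let gt := (pvVal sup current).foldl (fun gt node =>
          (nts.getD node []).foldl (fun (gt : PySem.Set String × PySem.Set String) other =>
            if !(PySem.Set.contains processed' other) && !(PySem.Set.contains gt.1 other)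
            then (PySem.Set.add gt.1 other, PySem.Set.add gt.2 other) else gt) gt)
        (group, rest)
      pvWorklist sup nts fuel gt.1 gt.2 processed'

-- A's first phase: collect supernode_groups and the processed set
def pvGroupsA (sup : List (String × List Int)) : List (PySem.Set String) × PySem.Set String :=
  (pvDupItems sup).foldl (fun st nd =>
    if nd.2.any (fun s => PySem.Set.contains st.2 s) then st
    else
      let gp := pvWorklist sup (pvNts sup) (nd.2.length + 2 * (nd.2.length + sup.length) + 1)
                  (PySem.Set.ofList nd.2) (PySem.Set.ofList nd.2) st.2
      if 1 < gp.1.length then (st.1 ++ [gp.1], gp.2) else (st.1, gp.2))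
    ([], PySem.Set.empty)

-- A.  (`used_supernodes` in A is write-only and never read, so it is not carried by the
-- port.  A iterates the set `group` to build the merged node set; that order is
-- unspecified in Python and the resulting set does not depend on it, so the port
-- enumerates the group in sorted order.)
def merge_supernodes_py (supernodes : List (String × List Int)) : List (String × List Int) :=
  let dup := pvDupItems supernodes
  if dup.isEmpty then supernodes else
  let st := pvGroupsA supernodes
  let init : PySem.Dict String (List Int) :=
    supernodes.foldl (fun d kv =>
      if PySem.Set.contains st.2 kv.1 then d else d.insert kv.1 kv.2) PySem.Dict.empty
  let fin := st.1.foldl (fun (d : PySem.Dict String (List Int)) group =>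
    let names := PySem.List.sorted group (fun x => x) false
    let merged := names.foldl (fun m n => PySem.Set.update m (pvVal supernodes n))
      (PySem.Set.empty : PySem.Set Int)
    d.insert (PySem.Str.join "_" names) merged) init
  fin.items

-- ===== PORT B =====
-- one saturation step: comp | {t for t in supernodes if any(share(t, s) for s in comp)}
def pvGrow (sup : List (String × List Int)) (comp : PySem.Set String) : PySem.Set String :=
  PySem.Set.union comp (PySem.Set.ofList ((sup.map Prod.fst).filter (fun t =>
    comp.any (fun s => !(PySem.Set.isdisjoint (pvVal sup t) (pvVal sup s))))))

-- B's `while True` saturation loop; fuel is a totality guard only (callers pass enough)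
def pvSaturate (sup : List (String × List Int)) : Nat → PySem.Set String → PySem.Set String
  | 0, comp => comp
  | fuel+1, comp =>
    let grown := pvGrow sup comp
    if PySem.Set.equal grown comp then comp else pvSaturate sup fuel grown

def merge_supernodes_py_alt (supernodes : List (String × List Int)) :
    List (String × List Int) :=
  let dup := pvDupItems supernodes
  if dup.isEmpty then supernodes else
  let mergedIds := dup.foldl (fun s nd => PySem.Set.update s nd.2)
    (PySem.Set.empty : PySem.Set String)
  let result0 : PySem.Dict String (List Int) :=
    PySem.Dict.mk (supernodes.filter (fun kv => !(PySem.Set.contains mergedIds kv.1)))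
  let fin := dup.foldl (fun (st : PySem.Dict String (List Int) × PySem.Set String) nd =>
    -- sn_ids[0]: sn_ids has ≥ 2 elements by the dup filter, so the `""` default is never used
    if PySem.Set.contains st.2 (nd.2.headD "") then st
    else
      let comp := pvSaturate supernodes (nd.2.length + supernodes.length + 1)
        (PySem.Set.ofList nd.2)
      let emitted := PySem.Set.update st.2 comp
      let names := PySem.List.sorted comp (fun x => x) false
      let merged := names.foldl (fun m n => PySem.Set.update m (pvVal supernodes n))
        (PySem.Set.empty : PySem.Set Int)
      (st.1.insert (PySem.Str.join "_" names) merged, emitted)) (result0, PySem.Set.empty)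
  fin.1.items

-- ===== PRECONDITION & SPEC =====
-- Pre_ only requires that the list encodes a Python value of the declared type
-- dict[str, set[int]]: distinct keys (a dict) and distinct elements in each value (a set).
-- Every actual Python input satisfies it.
def Pre_merge_supernodes_py (supernodes : List (String × List Int)) : Prop :=
  (supernodes.map Prod.fst).Nodup ∧ ∀ kv ∈ supernodes, kv.2.Nodup
instance (supernodes : List (String × List Int)) : Decidable (Pre_merge_supernodes_py supernodes) := by
  unfold Pre_merge_supernodes_py; infer_instance

def pvWitness_merge_supernodes_py : (List (String × List Int)) :=
  [("a", [1, 2]), ("b", [2, 3]), ("c", [7])]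

def Spec_merge_supernodes_py (supernodes : List (String × List Int)) (out : List (String × List Int)) : Prop := out = merge_supernodes_py_alt supernodes
instance (supernodes : List (String × List Int)) (out : List (String × List Int)) : Decidable (Spec_merge_supernodes_py supernodes out) := by unfold Spec_merge_supernodes_py; infer_instance

-- ===== CLAIM (what is proved, stated in full; the proofs are below) =====
def Claim_equal_merge_supernodes_py : Prop := ∀ (supernodes : List (String × List Int)), Dom_merge_supernodes_py supernodes → Pre_merge_supernodes_py supernodes → Spec_merge_supernodes_py supernodes (merge_supernodes_py supernodes)

-- ===== LEMMAS AND PROOFS =====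

-- ---- basic objects used by the proofs ----

def pvKeys (sup : List (String × List Int)) : List String := sup.map Prod.fst

-- the shared-node relation: `pvR sup s t` says t is a key of sup sharing a node with s
def pvR (sup : List (String × List Int)) (s t : String) : Prop :=
  t ∈ pvKeys sup ∧ ∃ n, n ∈ pvVal sup s ∧ n ∈ pvVal sup t

def pvReach (sup : List (String × List Int)) (seeds : List String) (x : String) : Prop :=
  ∃ s ∈ seeds, Relation.ReflTransGen (pvR sup) s x

-- the (key, merged-node-set) pair emitted for a group
def pvEmit (sup : List (String × List Int)) (g : PySem.Set String) :
    String × PySem.Set Int :=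
  let names := PySem.List.sorted g (fun x => x) false
  (PySem.Str.join "_" names,
   names.foldl (fun m n => PySem.Set.update m (pvVal sup n)) (PySem.Set.empty : PySem.Set Int))

-- ---- small facts ----

theorem pv_mem_keys {sup : List (String × List Int)} {k : String} :
    k ∈ pvKeys sup ↔ ∃ v, (k, v) ∈ sup := by
  constructor
  · intro h; rcases List.mem_map.mp h with ⟨⟨a, b⟩, hm, rfl⟩; exact ⟨b, hm⟩
  · rintro ⟨v, hm⟩; exact List.mem_map.mpr ⟨(k, v), hm, rfl⟩

theorem pvVal_of_mem {sup : List (String × List Int)} {k : String} {v : List Int}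
    (hnd : (sup.map Prod.fst).Nodup) (hm : (k, v) ∈ sup) : pvVal sup k = v := by
  have h1 : (PySem.Dict.mk sup).get? k = some v :=
    PySem.Dict.get?_of_mem_items (PySem.Dict.mk sup) hm hnd
  simp [pvVal, h1]

theorem pv_nodup_length_le {l₁ l₂ : List String} (h : l₁.Nodup) (hs : ∀ x ∈ l₁, x ∈ l₂) :
    l₁.length ≤ l₂.length := by
  calc l₁.length = l₁.toFinset.card := (List.toFinset_card_of_nodup h).symm
    _ ≤ l₂.toFinset.card := Finset.card_le_card (by
        intro a ha; rw [List.mem_toFinset] at *; exact hs a (by simpa using ha))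
    _ ≤ l₂.length := l₂.toFinset_card_le

theorem pv_one_lt_length {g : List String} {a b : String} (hg : g.Nodup)
    (ha : a ∈ g) (hb : b ∈ g) (hab : a ≠ b) : 1 < g.length := by
  have : 1 < g.toFinset.card := by
    rw [Finset.one_lt_card_iff]
    exact ⟨a, b, by simpa using ha, by simpa using hb, hab⟩
  calc 1 < g.toFinset.card := this
    _ ≤ g.length := g.toFinset_card_le

theorem pv_lt_length {l₁ l₂ : List String} (h₁ : l₁.Nodup) (hs : ∀ x ∈ l₁, x ∈ l₂)
    {y : String} (hy : y ∈ l₂) (hyn : y ∉ l₁) : l₁.length < l₂.length := by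
  have hcard : l₁.toFinset.card < l₂.toFinset.card := by
    apply Finset.card_lt_card
    constructor
    · intro a ha; rw [List.mem_toFinset] at *; exact hs a ha
    · intro hsub
      exact hyn (by simpa using hsub (List.mem_toFinset.mpr hy))
  calc l₁.length = l₁.toFinset.card := (List.toFinset_card_of_nodup h₁).symm
    _ < l₂.toFinset.card := hcard
    _ ≤ l₂.length := l₂.toFinset_card_le

-- ---- node_to_supernodes characterization ----

theorem pvNts_eq_flat (sup : List (String × List Int)) :
    pvNts sup = (sup.flatMap (fun kv => kv.2.map (fun m => (m, kv.1)))).foldl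
      (fun d p => d.modify p.1 [] (fun x => x ++ [p.2])) PySem.Dict.empty := by
  rw [List.foldl_flatMap]; simp only [List.foldl_map]; rfl

theorem pvNts_getD {sup : List (String × List Int)}
    (hval : ∀ kv ∈ sup, List.Nodup kv.2) (n : Int) :
    (pvNts sup).getD n [] = (sup.filter (fun kv => kv.2.contains n)).map Prod.fst := by
  rw [pvNts_eq_flat, PySem.Dict.getD_foldl_modify_append]
  rw [PySem.Dict.getD_empty]
  induction sup with
  | nil => rfl
  | cons kv rest ih =>
    have hkv : kv.2.Nodup := hval kv (by simp)
    have ih' := ih (fun e he => hval e (by simp [he]))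
    simp only [List.flatMap_cons, List.filter_append, List.map_append, List.filter_cons]
    by_cases hmem : n ∈ kv.2
    · have hcont : kv.2.contains n = true := by simpa using hmem
      have : List.filter (fun p => p.1 == n) (kv.2.map (fun m => (m, kv.1)))
          = [(n, kv.1)] := by
        rw [List.filter_map]
        have : (fun p => p.1 == n) ∘ (fun m => (m, kv.1)) = (fun m => m == n) := rfl
        rw [this, List.filter_beq, List.count_eq_one_of_mem hkv hmem]
        simp
      simp only [this, List.map_cons, List.map_nil, List.singleton_append]
      rw [if_pos hcont]
      simp only [List.nil_append] at ih' ⊢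
      simp only [List.map_cons]
      exact congrArg (kv.1 :: ·) ih'
    · have hcont : kv.2.contains n = false := by simpa using hmem
      have : List.filter (fun p => p.1 == n) (kv.2.map (fun m => (m, kv.1))) = [] := by
        rw [List.filter_map]
        have : (fun p => p.1 == n) ∘ (fun m => (m, kv.1)) = (fun m => m == n) := rfl
        rw [this, List.filter_beq, List.count_eq_zero_of_not_mem hmem]
        simp
      simp only [this, List.map_nil, List.nil_append]
      rw [if_neg (by simpa using hmem)]
      simp only [List.nil_append] at ih' ⊢
      exact ih'

theorem pvNts_keys_nodup (sup : List (String × List Int)) : (pvNts sup).keys.Nodup := by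
  rw [pvNts_eq_flat]
  exact PySem.Dict.nodup_keys_foldl_modify_key _ Prod.fst [] (fun _ p => (· ++ [p.2]))
    PySem.Dict.empty (by simp [PySem.Dict.keys_empty])

theorem pv_mem_nts_getD {sup : List (String × List Int)}
    (hnd : (sup.map Prod.fst).Nodup) (hval : ∀ kv ∈ sup, List.Nodup kv.2)
    {n : Int} {t : String} :
    t ∈ (pvNts sup).getD n [] ↔ t ∈ pvKeys sup ∧ n ∈ pvVal sup t := by
  rw [pvNts_getD hval]
  constructor
  · intro h
    rcases List.mem_map.mp h with ⟨⟨a, b⟩, hm, rfl⟩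
    rcases List.mem_filter.mp hm with ⟨hmem, hc⟩
    refine ⟨pv_mem_keys.mpr ⟨b, hmem⟩, ?_⟩
    rw [pvVal_of_mem hnd hmem]
    simpa using hc
  · rintro ⟨hk, hv⟩
    rcases pv_mem_keys.mp hk with ⟨v, hm⟩
    have hval_t : pvVal sup t = v := pvVal_of_mem hnd hm
    refine List.mem_map.mpr ⟨(t, v), List.mem_filter.mpr ⟨hm, ?_⟩, rfl⟩
    rw [hval_t] at hv; simpa using hv

theorem pv_nts_getD_nodup {sup : List (String × List Int)}
    (hnd : (sup.map Prod.fst).Nodup) (hval : ∀ kv ∈ sup, List.Nodup kv.2) (n : Int) :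
    ((pvNts sup).getD n []).Nodup := by
  rw [pvNts_getD hval]
  exact List.Nodup.sublist (List.Sublist.map Prod.fst List.filter_sublist) hnd

-- facts about an entry of pvDupItems
theorem pvDup_mem {sup : List (String × List Int)}
    (hnd : (sup.map Prod.fst).Nodup) (hval : ∀ kv ∈ sup, List.Nodup kv.2)
    {n : Int} {l : List String} (h : (n, l) ∈ pvDupItems sup) :
    l = (pvNts sup).getD n [] ∧ 1 < l.length := by
  rcases List.mem_filter.mp h with ⟨hm, hc⟩
  refine ⟨?_, by simpa using hc⟩
  exact (PySem.Dict.getD_of_mem_items (pvNts sup) hm (pvNts_keys_nodup sup) []).symm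

theorem pvDup_facts {sup : List (String × List Int)}
    (hnd : (sup.map Prod.fst).Nodup) (hval : ∀ kv ∈ sup, List.Nodup kv.2)
    {n : Int} {l : List String} (h : (n, l) ∈ pvDupItems sup) :
    1 < l.length ∧ l.Nodup ∧ (∀ t ∈ l, t ∈ pvKeys sup ∧ n ∈ pvVal sup t) := by
  obtain ⟨hl, hlen⟩ := pvDup_mem hnd hval h
  subst hl
  exact ⟨hlen, pv_nts_getD_nodup hnd hval n,
    fun t ht => (pv_mem_nts_getD hnd hval).mp ht⟩

-- a nonempty supernode list of a node is a dup entry when it has ≥ 2 elements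
theorem pv_getD_mem_dup {sup : List (String × List Int)} {n : Int}
    (h : 1 < ((pvNts sup).getD n []).length) :
    (n, (pvNts sup).getD n []) ∈ pvDupItems sup := by
  have hne : (pvNts sup).getD n [] ≠ [] := by
    intro hx; rw [hx] at h; simp at h
  rw [PySem.Dict.getD_eq_get?_getD] at h hne ⊢
  cases hget : (pvNts sup).get? n with
  | none => rw [hget] at hne; simp at hne
  | some l =>
    rw [hget] at h hne
    simp only [Option.getD_some] at h ⊢
    exact List.mem_filter.mpr ⟨PySem.Dict.mem_items_of_get?_eq_some _ hget, by simpa using h⟩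

-- ---- reachability facts ----

theorem pvR_symm {sup : List (String × List Int)} {s t : String}
    (hs : s ∈ pvKeys sup) (h : pvR sup s t) : pvR sup t s := by
  obtain ⟨ht, n, h1, h2⟩ := h; exact ⟨hs, n, h2, h1⟩

theorem pvReach_mem_of_closed {sup : List (String × List Int)} {seeds : List String}
    {C : String → Prop} (hseeds : ∀ s ∈ seeds, C s)
    (hC : ∀ x, C x → ∀ y, pvR sup x y → C y) {x : String}
    (h : pvReach sup seeds x) : C x := by
  obtain ⟨s, hsm, hpath⟩ := h
  induction hpath with
  | refl => exact hseeds s hsm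
  | tail hp hstep ih => exact hC _ ih _ hstep

-- a set closed under pvR that misses the seeds misses everything they reach
theorem pvReach_not_mem_closed {sup : List (String × List Int)} {seeds : List String}
    {P : String → Prop} (hP : ∀ x, P x → ∀ y, pvR sup x y → P y)
    (hsk : ∀ s ∈ seeds, s ∈ pvKeys sup) (hdisj : ∀ s ∈ seeds, ¬ P s)
    {x : String} (h : pvReach sup seeds x) : ¬ P x := by
  have : ∀ z, pvReach sup seeds z → z ∈ pvKeys sup ∧ ¬ P z := by
    intro z hz
    refine pvReach_mem_of_closed (C := fun z => z ∈ pvKeys sup ∧ ¬ P z) ?_ ?_ hz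
    · exact fun s hs => ⟨hsk s hs, hdisj s hs⟩
    · rintro a ⟨hak, haP⟩ b hab
      refine ⟨hab.1, fun hbP => haP ?_⟩
      exact hP b hbP a (pvR_symm hak hab)
  exact (this x h).2

-- every element reached from a dup entry's supernode list occurs in some dup entry
theorem pvReach_mem_dup {sup : List (String × List Int)}
    (hnd : (sup.map Prod.fst).Nodup) (hval : ∀ kv ∈ sup, List.Nodup kv.2)
    {n0 : Int} {l0 : List String} (h0 : (n0, l0) ∈ pvDupItems sup)
    {x : String} (hx : pvReach sup l0 x) : ∃ nd ∈ pvDupItems sup, x ∈ nd.2 := by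
  obtain ⟨hlen0, hnodup0, hfacts0⟩ := pvDup_facts hnd hval h0
  refine pvReach_mem_of_closed
    (C := fun z => (∃ nd ∈ pvDupItems sup, z ∈ nd.2) ∧ z ∈ pvKeys sup) ?_ ?_ hx |>.1
  · exact fun s hs => ⟨⟨(n0, l0), h0, hs⟩, (hfacts0 s hs).1⟩
  · rintro a ⟨ha, hak⟩ b hab
    obtain ⟨hbk, n, hna, hnb⟩ := hab
    by_cases heq : b = a
    · subst heq; exact ⟨ha, hak⟩
    refine ⟨?_, hbk⟩
    have hamem : a ∈ (pvNts sup).getD n [] :=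
      (pv_mem_nts_getD hnd hval).mpr ⟨hak, hna⟩
    have hbmem : b ∈ (pvNts sup).getD n [] :=
      (pv_mem_nts_getD hnd hval).mpr ⟨hbk, hnb⟩
    have hlen : 1 < ((pvNts sup).getD n []).length :=
      pv_one_lt_length (pv_nts_getD_nodup hnd hval n) hbmem hamem heq
    exact ⟨(n, (pvNts sup).getD n []), pv_getD_mem_dup hlen, hbmem⟩

-- ---- the inner double loop of A's worklist ----

theorem pv_wkInner (processed' : PySem.Set String) (os : List String) :
    ∀ (g t : PySem.Set String), g.Nodup → t.Nodup → (∀ x ∈ t, x ∈ g) →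
    (let r := os.foldl (fun (gt : PySem.Set String × PySem.Set String) other =>
        if !(PySem.Set.contains processed' other) && !(PySem.Set.contains gt.1 other)
        then (PySem.Set.add gt.1 other, PySem.Set.add gt.2 other) else gt) (g, t)
     (∀ x, x ∈ r.1 ↔ x ∈ g ∨ (x ∈ os ∧ x ∉ processed')) ∧
     (∀ x, x ∈ r.2 ↔ x ∈ t ∨ (x ∈ os ∧ x ∉ processed' ∧ x ∉ g)) ∧
     r.1.Nodup ∧ r.2.Nodup ∧ (∀ x ∈ r.2, x ∈ r.1) ∧
     r.1.length + t.length = g.length + r.2.length) := by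
  induction os with
  | nil =>
    intro g t hg ht hts
    exact ⟨fun x => by simp, fun x => by simp, hg, ht, hts, by simp⟩
  | cons o os ih =>
    intro g t hg ht hts
    simp only [List.foldl_cons]
    by_cases hco : o ∈ processed'
    · rw [if_neg (by simp [hco])]
      obtain ⟨m1, m2, n1, n2, sub, len⟩ := ih g t hg ht hts
      refine ⟨fun x => ?_, fun x => ?_, n1, n2, sub, len⟩
      · rw [m1 x]
        constructor
        · rintro (h | ⟨h1, h2⟩) <;> [exact Or.inl h; exact Or.inr ⟨List.mem_cons_of_mem _ h1, h2⟩]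
        · rintro (h | ⟨h1, h2⟩)
          · exact Or.inl h
          · rcases List.mem_cons.mp h1 with rfl | h1'
            · exact absurd hco h2
            · exact Or.inr ⟨h1', h2⟩
      · rw [m2 x]
        constructor
        · rintro (h | ⟨h1, h2, h3⟩) <;> [exact Or.inl h; exact Or.inr ⟨List.mem_cons_of_mem _ h1, h2, h3⟩]
        · rintro (h | ⟨h1, h2, h3⟩)
          · exact Or.inl h
          · rcases List.mem_cons.mp h1 with rfl | h1'
            · exact absurd hco h2
            · exact Or.inr ⟨h1', h2, h3⟩
    · by_cases hgo : o ∈ g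
      · rw [if_neg (by simp [hgo])]
        obtain ⟨m1, m2, n1, n2, sub, len⟩ := ih g t hg ht hts
        refine ⟨fun x => ?_, fun x => ?_, n1, n2, sub, len⟩
        · rw [m1 x]
          constructor
          · rintro (h | ⟨h1, h2⟩) <;> [exact Or.inl h; exact Or.inr ⟨List.mem_cons_of_mem _ h1, h2⟩]
          · rintro (h | ⟨h1, h2⟩)
            · exact Or.inl h
            · rcases List.mem_cons.mp h1 with rfl | h1'
              · exact Or.inl hgo
              · exact Or.inr ⟨h1', h2⟩
        · rw [m2 x]
          constructor
          · rintro (h | ⟨h1, h2, h3⟩) <;> [exact Or.inl h; exact Or.inr ⟨List.mem_cons_of_mem _ h1, h2, h3⟩]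
          · rintro (h | ⟨h1, h2, h3⟩)
            · exact Or.inl h
            · rcases List.mem_cons.mp h1 with rfl | h1'
              · exact absurd hgo h3
              · exact Or.inr ⟨h1', h2, h3⟩
      · rw [if_pos (by simp [hco, hgo])]
        have hto : o ∉ t := fun hx => hgo (hts o hx)
        have hsub' : ∀ x ∈ PySem.Set.add t o, x ∈ PySem.Set.add g o := by
          intro x hx
          rcases (PySem.Set.mem_add t o x).mp hx with h | h
          · exact (PySem.Set.mem_add g o x).mpr (Or.inl (hts x h))
          · exact (PySem.Set.mem_add g o x).mpr (Or.inr h)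
        obtain ⟨m1, m2, n1, n2, sub, len⟩ := ih (PySem.Set.add g o) (PySem.Set.add t o)
          (PySem.Set.nodup_add g o hg) (PySem.Set.nodup_add t o ht) hsub'
        refine ⟨fun x => ?_, fun x => ?_, n1, n2, sub, ?_⟩
        · rw [m1 x, PySem.Set.mem_add]
          constructor
          · rintro ((h | rfl) | ⟨h1, h2⟩)
            · exact Or.inl h
            · exact Or.inr ⟨List.mem_cons_self, hco⟩
            · exact Or.inr ⟨List.mem_cons_of_mem _ h1, h2⟩
          · rintro (h | ⟨h1, h2⟩)
            · exact Or.inl (Or.inl h)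
            · rcases List.mem_cons.mp h1 with rfl | h1'
              · exact Or.inl (Or.inr rfl)
              · exact Or.inr ⟨h1', h2⟩
        · rw [m2 x, PySem.Set.mem_add]
          constructor
          · rintro ((h | rfl) | ⟨h1, h2, h3⟩)
            · exact Or.inl h
            · exact Or.inr ⟨List.mem_cons_self, hco, hgo⟩
            · exact Or.inr ⟨List.mem_cons_of_mem _ h1, h2,
                fun hxg => h3 ((PySem.Set.mem_add g o x).mpr (Or.inl hxg))⟩
          · rintro (h | ⟨h1, h2, h3⟩)
            · exact Or.inl (Or.inl h)
            · rcases List.mem_cons.mp h1 with rfl | h1'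
              · exact Or.inl (Or.inr rfl)
              · by_cases hxo : x = o
                · exact Or.inl (Or.inr hxo)
                · refine Or.inr ⟨h1', h2, fun hx => ?_⟩
                  rcases (PySem.Set.mem_add g o x).mp hx with h | h
                  · exact h3 h
                  · exact hxo h
        · have lg : (PySem.Set.add g o).length = g.length + 1 := by
            rw [PySem.Set.add_of_not_mem hgo, List.length_append, List.length_cons, List.length_nil]
          have lt : (PySem.Set.add t o).length = t.length + 1 := by
            rw [PySem.Set.add_of_not_mem hto, List.length_append, List.length_cons, List.length_nil]
          omega

-- ---- A's worklist computes the reachable component ----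

theorem pv_worklist_spec {sup : List (String × List Int)}
    (hnd : (sup.map Prod.fst).Nodup) (hval : ∀ kv ∈ sup, List.Nodup kv.2)
    (P0 : PySem.Set String)
    (hP0closed : ∀ x ∈ P0, ∀ y, pvR sup x y → y ∈ P0)
    (seeds : List String) (hseedk : ∀ s ∈ seeds, s ∈ pvKeys sup) :
    ∀ (fuel : Nat) (group tp processed : PySem.Set String),
    group.Nodup → tp.Nodup → (∀ x ∈ tp, x ∈ group) →
    (∀ x ∈ group, x ∈ pvKeys sup) →
    (∀ x ∈ group, pvReach sup seeds x) →
    (∀ s ∈ seeds, s ∈ group) →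
    (∀ x ∈ group, x ∉ P0) →
    (∀ x ∈ group, x ∉ tp → ∀ y, pvR sup x y → y ∈ group ∨ y ∈ P0) →
    (∀ x, x ∈ processed ↔ x ∈ P0 ∨ (x ∈ group ∧ x ∉ tp)) →
    tp.length + 2 * ((PySem.Set.update group (pvKeys sup)).length - group.length) ≤ fuel →
    (let r := pvWorklist sup (pvNts sup) fuel group tp processed
     (∀ x, x ∈ r.1 ↔ pvReach sup seeds x) ∧
     (∀ x, x ∈ r.2 ↔ x ∈ P0 ∨ x ∈ r.1) ∧
     r.1.Nodup ∧ (∀ x ∈ r.1, x ∈ pvKeys sup)) := by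
  have hfinal : ∀ (group processed : PySem.Set String), group.Nodup →
      (∀ x ∈ group, x ∈ pvKeys sup) → (∀ x ∈ group, pvReach sup seeds x) →
      (∀ s ∈ seeds, s ∈ group) → (∀ x ∈ group, x ∉ P0) →
      (∀ x ∈ group, ∀ y, pvR sup x y → y ∈ group ∨ y ∈ P0) →
      (∀ x, x ∈ processed ↔ x ∈ P0 ∨ x ∈ group) →
      ((∀ x, x ∈ group ↔ pvReach sup seeds x) ∧
       (∀ x, x ∈ processed ↔ x ∈ P0 ∨ x ∈ group) ∧
       group.Nodup ∧ (∀ x ∈ group, x ∈ pvKeys sup)) := by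
    intro group processed hgn hgk hgr hsg hgP0 hclosed hproc
    have hclaim : ∀ x, pvReach sup seeds x → x ∈ group := by
      intro x hr
      obtain ⟨s, hsm, hpath⟩ := hr
      induction hpath with
    | refl => exact hsg s hsm
    | @tail mid b hp hstep ihp =>
      have hmid : mid ∈ group := ihp
      rcases hclosed mid hmid b hstep with h | h
      · exact h
      · exfalso
        have hbr : pvReach sup seeds b := ⟨s, hsm, hp.tail hstep⟩
        exact pvReach_not_mem_closed (P := fun z => z ∈ P0)
          (fun u hu v huv => hP0closed u hu v huv) hseedk
          (fun u hu => hgP0 u (hsg u hu)) hbr h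
    exact ⟨fun x => ⟨hgr x, hclaim x⟩, hproc, hgn, hgk⟩
  intro fuel
  induction fuel with
  | zero =>
    intro group tp processed hgn htn hts hgk hgr hsg hgP0 hclosed hproc hfuel
    have htp : tp = [] := by
      cases tp with
      | nil => rfl
      | cons a b => simp at hfuel
    subst htp
    exact hfinal group processed hgn hgk hgr hsg hgP0
      (fun x hx => hclosed x hx (by simp)) (by simpa using hproc)
  | succ fuel ih =>
    intro group tp processed hgn htn hts hgk hgr hsg hgP0 hclosed hproc hfuel
    cases tp with
    | nil =>
      exact hfinal group processed hgn hgk hgr hsg hgP0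
        (fun x hx => hclosed x hx (by simp)) (by simpa using hproc)
    | cons current rest =>
      have hcur_g : current ∈ group := hts current List.mem_cons_self
      have hcur_rest : current ∉ rest := (List.nodup_cons.mp htn).1
      have hrestn : rest.Nodup := (List.nodup_cons.mp htn).2
      have hrest_sub : ∀ x ∈ rest, x ∈ group := fun x hx => hts x (List.mem_cons_of_mem _ hx)
      -- the flattened candidate list and its meaning
      set os := (pvVal sup current).flatMap (fun n => (pvNts sup).getD n []) with hos_def
      have hos : ∀ y, y ∈ os ↔ pvR sup current y := by
        intro y
        rw [hos_def, List.mem_flatMap]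
        constructor
        · rintro ⟨n, hn, hy⟩
          obtain ⟨hk, hv⟩ := (pv_mem_nts_getD hnd hval).mp hy
          exact ⟨hk, n, hn, hv⟩
        · rintro ⟨hk, n, hn, hv⟩
          exact ⟨n, hn, (pv_mem_nts_getD hnd hval).mpr ⟨hk, hv⟩⟩
      set processed' := PySem.Set.add processed current with hp'_def
      have hp'mem : ∀ x, x ∈ processed' ↔ x ∈ processed ∨ x = current :=
        fun x => PySem.Set.mem_add processed current x
      set gt := (pvVal sup current).foldl (fun gt0 node =>
          ((pvNts sup).getD node []).foldl (fun (gt1 : PySem.Set String × PySem.Set String) other =>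
            if !(PySem.Set.contains processed' other) && !(PySem.Set.contains gt1.1 other)
            then (PySem.Set.add gt1.1 other, PySem.Set.add gt1.2 other) else gt1) gt0)
          (group, rest) with hgt_def
      have hgt_flat : gt = os.foldl (fun (gt1 : PySem.Set String × PySem.Set String) other =>
            if !(PySem.Set.contains processed' other) && !(PySem.Set.contains gt1.1 other)
            then (PySem.Set.add gt1.1 other, PySem.Set.add gt1.2 other) else gt1) (group, rest) := by
        rw [hgt_def, hos_def]
        exact List.foldl_flatMap.symm
      obtain ⟨m1, m2, n1, n2, sub, len⟩ := pv_wkInner processed' os group rest hgn hrestn hrest_sub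
      rw [← hgt_flat] at m1 m2 n1 n2 sub len
      -- hypotheses for the recursive call
      have hk1 : ∀ x ∈ gt.1, x ∈ pvKeys sup := by
        intro x hx
        rcases (m1 x).mp hx with h | ⟨h1, _⟩
        · exact hgk x h
        · exact ((hos x).mp h1).1
      have hr1 : ∀ x ∈ gt.1, pvReach sup seeds x := by
        intro x hx
        rcases (m1 x).mp hx with h | ⟨h1, _⟩
        · exact hgr x h
        · obtain ⟨s, hsm, hpath⟩ := hgr current hcur_g
          exact ⟨s, hsm, hpath.tail ((hos x).mp h1)⟩
      have hs1 : ∀ s ∈ seeds, s ∈ gt.1 := fun s hs => (m1 s).mpr (Or.inl (hsg s hs))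
      have hP01 : ∀ x ∈ gt.1, x ∉ P0 := by
        intro x hx hxP0
        rcases (m1 x).mp hx with h | ⟨_, h2⟩
        · exact hgP0 x h hxP0
        · exact h2 ((hp'mem x).mpr (Or.inl ((hproc x).mpr (Or.inl hxP0))))
      have hclosed1 : ∀ x ∈ gt.1, x ∉ gt.2 → ∀ y, pvR sup x y → y ∈ gt.1 ∨ y ∈ P0 := by
        intro x hx hxnt y hxy
        by_cases hxg : x ∈ group
        · by_cases hxc : x = current
          · subst hxc
            have hyos : y ∈ os := (hos y).mpr hxy
            by_cases hyp : y ∈ processed'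
            · rcases (hp'mem y).mp hyp with h | rfl
              · rcases (hproc y).mp h with h' | ⟨h1, _⟩
                · exact Or.inr h'
                · exact Or.inl ((m1 y).mpr (Or.inl h1))
              · exact Or.inl ((m1 y).mpr (Or.inl hcur_g))
            · exact Or.inl ((m1 y).mpr (Or.inr ⟨hyos, hyp⟩))
          · have hxrest : x ∉ rest := fun hr => hxnt ((m2 x).mpr (Or.inl hr))
            have hxtp : x ∉ current :: rest := by
              intro h; rcases List.mem_cons.mp h with h | h
              · exact hxc h
              · exact hxrest h
            rcases hclosed x hxg hxtp y hxy with h | h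
            · exact Or.inl ((m1 y).mpr (Or.inl h))
            · exact Or.inr h
        · rcases (m1 x).mp hx with h | ⟨h1, h2⟩
          · exact absurd h hxg
          · exact absurd ((m2 x).mpr (Or.inr ⟨h1, h2, hxg⟩)) hxnt
      have hproc1 : ∀ x, x ∈ processed' ↔ x ∈ P0 ∨ (x ∈ gt.1 ∧ x ∉ gt.2) := by
        intro x
        constructor
        · intro hx
          rcases (hp'mem x).mp hx with h | rfl
          · rcases (hproc x).mp h with h' | ⟨h1, h2⟩
            · exact Or.inl h'
            · refine Or.inr ⟨(m1 x).mpr (Or.inl h1), fun hxt => ?_⟩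
              rcases (m2 x).mp hxt with hr | ⟨_, _, hg⟩
              · exact h2 (List.mem_cons_of_mem _ hr)
              · exact hg h1
          · refine Or.inr ⟨(m1 x).mpr (Or.inl hcur_g), fun hxt => ?_⟩
            rcases (m2 x).mp hxt with hr | ⟨_, _, hg⟩
            · exact hcur_rest hr
            · exact hg hcur_g
        · rintro (h | ⟨h1, h2⟩)
          · exact (hp'mem x).mpr (Or.inl ((hproc x).mpr (Or.inl h)))
          · by_cases hxg : x ∈ group
            · by_cases hxc : x = current
              · exact (hp'mem x).mpr (Or.inr hxc)
              · have hxrest : x ∉ rest := fun hr => h2 ((m2 x).mpr (Or.inl hr))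
                refine (hp'mem x).mpr (Or.inl ((hproc x).mpr (Or.inr ⟨hxg, ?_⟩)))
                intro hxt
                rcases List.mem_cons.mp hxt with h' | h'
                · exact hxc h'
                · exact hxrest h'
            · rcases (m1 x).mp h1 with h' | ⟨ha, hb⟩
              · exact absurd h' hxg
              · exact absurd ((m2 x).mpr (Or.inr ⟨ha, hb, hxg⟩)) h2
      -- fuel bookkeeping
      have hosk : ∀ x ∈ os, x ∈ pvKeys sup := fun x hx => ((hos x).mp hx).1
      have hueq : (PySem.Set.update gt.1 (pvKeys sup)).length
          = (PySem.Set.update group (pvKeys sup)).length := by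
        apply List.Perm.length_eq
        rw [List.perm_ext_iff_of_nodup (PySem.Set.nodup_update _ _ n1)
          (PySem.Set.nodup_update _ _ hgn)]
        intro a
        rw [PySem.Set.mem_update, PySem.Set.mem_update]
        constructor
        · rintro (h | h)
          · rcases (m1 a).mp h with h' | ⟨h1, _⟩
            · exact Or.inl h'
            · exact Or.inr (hosk a h1)
          · exact Or.inr h
        · rintro (h | h)
          · exact Or.inl ((m1 a).mpr (Or.inl h))
          · exact Or.inr h
      have hle1 : group.length ≤ (PySem.Set.update group (pvKeys sup)).length := by
        rw [PySem.Set.update_eq_append_filter, List.length_append]; omega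
      have hle2 : gt.1.length ≤ (PySem.Set.update gt.1 (pvKeys sup)).length := by
        rw [PySem.Set.update_eq_append_filter, List.length_append]; omega
      have hglen : group.length ≤ gt.1.length :=
        pv_nodup_length_le hgn (fun x hx => (m1 x).mpr (Or.inl hx))
      have hfuel1 : gt.2.length + 2 * ((PySem.Set.update gt.1 (pvKeys sup)).length - gt.1.length) ≤ fuel := by
        have hf' : rest.length + 1 + 2 * ((PySem.Set.update group (pvKeys sup)).length
            - group.length) ≤ fuel + 1 := by simpa using hfuel
        rw [hueq]
        have hlenfacts : gt.1.length + rest.length = group.length + gt.2.length := len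
        rw [hueq] at hle2
        omega
      have hres := ih gt.1 gt.2 processed' n1 n2 sub hk1 hr1 hs1 hP01 hclosed1 hproc1 hfuel1
      have hunfold : pvWorklist sup (pvNts sup) (fuel+1) group (current::rest) processed
          = pvWorklist sup (pvNts sup) fuel gt.1 gt.2 processed' := rfl
      simpa only [hunfold] using hres

-- ---- B's saturation computes the reachable component ----

theorem pv_grow_mem {sup : List (String × List Int)} (comp : PySem.Set String) (x : String) :
    x ∈ pvGrow sup comp ↔ x ∈ comp ∨ ∃ s ∈ comp, pvR sup s x := by
  unfold pvGrow
  rw [PySem.Set.mem_union, PySem.Set.mem_ofList, List.mem_filter]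
  apply or_congr Iff.rfl
  constructor
  · rintro ⟨hk, hp⟩
    rcases List.any_eq_true.mp hp with ⟨s2, hs2, hb⟩
    have hf : PySem.Set.isdisjoint (pvVal sup x) (pvVal sup s2) = false := by simpa using hb
    have hnd' : ¬ (PySem.Set.isdisjoint (pvVal sup x) (pvVal sup s2) = true) := by simp [hf]
    rw [PySem.Set.isdisjoint_iff] at hnd'
    push_neg at hnd'
    obtain ⟨n, hn1, hn2⟩ := hnd'
    exact ⟨s2, hs2, hk, n, hn2, hn1⟩
  · rintro ⟨s2, hs2, hk, n, hns, hnx⟩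
    refine ⟨hk, List.any_eq_true.mpr ⟨s2, hs2, ?_⟩⟩
    simp only [Bool.not_eq_true']
    rw [← Bool.not_eq_true, PySem.Set.isdisjoint_iff]
    push_neg
    exact ⟨n, hnx, hns⟩

theorem pv_saturate_spec {sup : List (String × List Int)}
    (hnd : (sup.map Prod.fst).Nodup)
    (seeds : List String) :
    ∀ (fuel : Nat) (comp : PySem.Set String), comp.Nodup →
    (∀ s ∈ seeds, s ∈ comp) →
    (∀ x ∈ comp, pvReach sup seeds x) →
    (∀ x ∈ comp, x ∈ pvKeys sup) →
    (pvKeys sup).length + 1 ≤ fuel + comp.length →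
    (let r := pvSaturate sup fuel comp
     (∀ x, x ∈ r ↔ pvReach sup seeds x) ∧ r.Nodup) := by
  intro fuel
  induction fuel with
  | zero =>
    intro comp hcnd hseeds hreach hkeys hfuel
    exfalso
    have := pv_nodup_length_le hcnd hkeys
    simp only [Nat.zero_add] at hfuel
    omega
  | succ fuel ih =>
    intro comp hcnd hseeds hreach hkeys hfuel
    show (∀ x, x ∈ (if PySem.Set.equal (pvGrow sup comp) comp then comp
        else pvSaturate sup fuel (pvGrow sup comp)) ↔ pvReach sup seeds x) ∧
      (if PySem.Set.equal (pvGrow sup comp) comp then comp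
        else pvSaturate sup fuel (pvGrow sup comp)).Nodup
    by_cases heq : PySem.Set.equal (pvGrow sup comp) comp = true
    · rw [if_pos heq]
      have hmem := (PySem.Set.equal_iff _ _).mp heq
      refine ⟨fun x => ⟨hreach x, fun hr => ?_⟩, hcnd⟩
      refine pvReach_mem_of_closed (C := fun z => z ∈ comp) hseeds ?_ hr
      intro a ha b hab
      exact (hmem b).mp ((pv_grow_mem (sup := sup) comp b).mpr (Or.inr ⟨a, ha, hab⟩))
    · rw [if_neg heq]
      have hsub : ∀ x ∈ comp, x ∈ pvGrow sup comp :=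
        fun x hx => (pv_grow_mem comp x).mpr (Or.inl hx)
      have hstrict : ∃ y, y ∈ pvGrow sup comp ∧ y ∉ comp := by
        by_contra hno
        push_neg at hno
        exact heq ((PySem.Set.equal_iff _ _).mpr
          (fun x => ⟨fun hx => hno x hx, fun hx => hsub x hx⟩))
      obtain ⟨y, hy, hyn⟩ := hstrict
      have hgn : (pvGrow sup comp).Nodup := by
        unfold pvGrow; exact PySem.Set.nodup_union _ _ hcnd
      have hlt : comp.length < (pvGrow sup comp).length := pv_lt_length hcnd hsub hy hyn
      have hgk : ∀ x ∈ pvGrow sup comp, x ∈ pvKeys sup := by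
        intro x hx
        rcases (pv_grow_mem comp x).mp hx with h | ⟨s2, _, hr⟩
        · exact hkeys x h
        · exact hr.1
      have hgr : ∀ x ∈ pvGrow sup comp, pvReach sup seeds x := by
        intro x hx
        rcases (pv_grow_mem comp x).mp hx with h | ⟨s2, hs2, hr⟩
        · exact hreach x h
        · obtain ⟨s, hsm, hpath⟩ := hreach s2 hs2
          exact ⟨s, hsm, hpath.tail hr⟩
      have hglen := pv_nodup_length_le hgn hgk
      exact ih (pvGrow sup comp) hgn (fun s hssd => hsub s (hseeds s hssd)) hgr hgk (by omega)

-- ---- sorted lists of equal node-sets agree ----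

theorem pv_sorted_eq {s t : List String} (hs : s.Nodup) (ht : t.Nodup)
    (h : ∀ x, x ∈ s ↔ x ∈ t) :
    PySem.List.sorted s (fun x => x) false = PySem.List.sorted t (fun x => x) false := by
  have hperm : (PySem.List.sorted s (fun x => x) false).Perm
      (PySem.List.sorted t (fun x => x) false) :=
    ((PySem.List.sorted_perm s (fun x => x) false).trans
      ((List.perm_ext_iff_of_nodup hs ht).mpr h)).trans
      (PySem.List.sorted_perm t (fun x => x) false).symm
  exact PySem.List.eq_of_perm_of_pairwise_le_of_injective (fun x => x)
    (fun a b hab => hab) hperm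
    (PySem.List.sorted_pairwise s (fun x => x)) (PySem.List.sorted_pairwise t (fun x => x))

-- ---- merged_ids membership ----

theorem pv_mergedIds_mem (dup : List (Int × List String)) (x : String) :
    x ∈ dup.foldl (fun s nd => PySem.Set.update s nd.2)
        (PySem.Set.empty : PySem.Set String) ↔ ∃ nd ∈ dup, x ∈ nd.2 := by
  suffices h : ∀ (l : List (Int × List String)) (s0 : PySem.Set String),
      x ∈ l.foldl (fun s nd => PySem.Set.update s nd.2) s0 ↔ x ∈ s0 ∨ ∃ nd ∈ l, x ∈ nd.2 by
    rw [h]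
    simp [PySem.Set.empty]
  intro l
  induction l with
  | nil => intro s0; simp
  | cons e l ih =>
    intro s0
    simp only [List.foldl_cons]
    rw [ih, PySem.Set.mem_update]
    simp only [List.mem_cons]
    constructor
    · rintro ((h | h) | ⟨nd, hnd, hx⟩)
      · exact Or.inl h
      · exact Or.inr ⟨e, Or.inl rfl, h⟩
      · exact Or.inr ⟨nd, Or.inr hnd, hx⟩
    · rintro (h | ⟨nd, (rfl | hnd), hx⟩)
      · exact Or.inl (Or.inl h)
      · exact Or.inl (Or.inr hx)
      · exact Or.inr ⟨nd, hnd, hx⟩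

-- ---- the joint outer fold ----

theorem pv_fold_joint {sup : List (String × List Int)}
    (hnd : (sup.map Prod.fst).Nodup) (hval : ∀ kv ∈ sup, List.Nodup kv.2) :
    ∀ (rest : List (Int × List String)), (∀ e ∈ rest, e ∈ pvDupItems sup) →
    ∀ (gs0 : List (PySem.Set String)) (procA emB : PySem.Set String)
      (outB : PySem.Dict String (List Int)),
    (∀ x, x ∈ procA ↔ x ∈ emB) →
    (∀ x ∈ procA, ∀ y, pvR sup x y → y ∈ procA) →
    (∀ x ∈ procA, x ∈ pvKeys sup) →
    (let ra := rest.foldl (fun st nd =>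
        if nd.2.any (fun s => PySem.Set.contains st.2 s) then st
        else
          let gp := pvWorklist sup (pvNts sup)
            (nd.2.length + 2 * (nd.2.length + sup.length) + 1)
            (PySem.Set.ofList nd.2) (PySem.Set.ofList nd.2) st.2
          if 1 < gp.1.length then (st.1 ++ [gp.1], gp.2) else (st.1, gp.2)) (gs0, procA)
     let rb := rest.foldl (fun (st : PySem.Dict String (List Int) × PySem.Set String) nd =>
        if PySem.Set.contains st.2 (nd.2.headD "") then st
        else
          let comp := pvSaturate sup (nd.2.length + sup.length + 1) (PySem.Set.ofList nd.2)
          let emitted := PySem.Set.update st.2 comp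
          let names := PySem.List.sorted comp (fun x => x) false
          let merged := names.foldl (fun m n => PySem.Set.update m (pvVal sup n))
            (PySem.Set.empty : PySem.Set Int)
          (st.1.insert (PySem.Str.join "_" names) merged, emitted)) (outB, emB)
     ∃ Δ, ra.1 = gs0 ++ Δ ∧
       rb.1 = Δ.foldl (fun d g => d.insert (pvEmit sup g).1 (pvEmit sup g).2) outB ∧
       (∀ x, x ∈ ra.2 ↔ x ∈ rb.2) ∧
       (∀ x ∈ ra.2, ∀ y, pvR sup x y → y ∈ ra.2) ∧
       (∀ x ∈ ra.2, x ∈ pvKeys sup) ∧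
       (∀ e ∈ rest, ∀ t ∈ e.2, t ∈ ra.2) ∧
       (∀ x ∈ procA, x ∈ ra.2) ∧
       (∀ x ∈ ra.2, x ∈ procA ∨ ∃ e ∈ rest, pvReach sup e.2 x)) := by
  intro rest
  induction rest with
  | nil =>
    intro hrest gs0 procA emB outB hPE hclosed hkeys
    exact ⟨[], by simp, by simp, hPE, hclosed, hkeys, by simp, fun x hx => hx,
      fun x hx => Or.inl hx⟩
  | cons e rest' ih =>
    intro hrest gs0 procA emB outB hPE hclosed hkeys
    have he : e ∈ pvDupItems sup := hrest e List.mem_cons_self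
    have hrest' : ∀ x ∈ rest', x ∈ pvDupItems sup := fun x hx => hrest x (List.mem_cons_of_mem _ hx)
    obtain ⟨hlen, hnodupl, hfacts⟩ := pvDup_facts hnd hval he
    obtain ⟨t0, l', hl⟩ : ∃ t0 l', e.2 = t0 :: l' := by
      cases hll : e.2 with
      | nil => rw [hll] at hlen; simp at hlen
      | cons a b => exact ⟨a, b, rfl⟩
    have hhead : e.2.headD "" = t0 := by rw [hl]; rfl
    have ht0mem : t0 ∈ e.2 := by rw [hl]; exact List.mem_cons_self
    have hpair : ∀ t ∈ e.2, ∀ t' ∈ e.2, pvR sup t t' := by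
      intro t ht t' ht'
      exact ⟨(hfacts t' ht').1, e.1, (hfacts t ht).2, (hfacts t' ht').2⟩
    have hskipiff : (e.2.any (fun s => PySem.Set.contains procA s) = true) ↔ t0 ∈ procA := by
      constructor
      · intro h
        rcases List.any_eq_true.mp h with ⟨t, ht, hb⟩
        exact hclosed t ((PySem.Set.contains_iff _ _).mp hb) t0 (hpair t ht t0 ht0mem)
      · intro h
        exact List.any_eq_true.mpr ⟨t0, ht0mem, (PySem.Set.contains_iff _ _).mpr h⟩
    simp only [List.foldl_cons]
    rw [hhead]
    by_cases hskip : t0 ∈ procA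
    · rw [if_pos (hskipiff.mpr hskip), if_pos ((PySem.Set.contains_iff _ _).mpr ((hPE t0).mp hskip))]
      obtain ⟨Δ', d1, d2, d3, d4, d5, d6, d7, d8⟩ := ih hrest' gs0 procA emB outB hPE hclosed hkeys
      refine ⟨Δ', d1, d2, d3, d4, d5, ?_, d7, ?_⟩
      · intro e' he' t ht
        rcases List.mem_cons.mp he' with rfl | he''
        · exact d7 t (hclosed t0 hskip t (hpair t0 ht0mem t ht))
        · exact d6 e' he'' t ht
      · intro x hx
        rcases d8 x hx with h | ⟨e', he', hr⟩
        · exact Or.inl h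
        · exact Or.inr ⟨e', List.mem_cons_of_mem _ he', hr⟩
    · have hBskip : ¬ (PySem.Set.contains emB t0 = true) := by
        rw [PySem.Set.contains_iff]
        exact fun h => hskip ((hPE t0).mpr h)
      rw [if_neg (fun h => hskip (hskipiff.mp h)), if_neg hBskip]
      have hofl : PySem.Set.ofList e.2 = e.2 := PySem.Set.ofList_eq_self_of_nodup _ hnodupl
      rw [hofl]
      have hseedk : ∀ s ∈ e.2, s ∈ pvKeys sup := fun s hs => (hfacts s hs).1
      have hdisj : ∀ x ∈ e.2, x ∉ procA := by
        intro x hx hxp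
        exact hskip (hclosed x hxp t0 (hpair x hx t0 ht0mem))
      have hkeyslen : (pvKeys sup).length = sup.length := by simp [pvKeys]
      have hfuel : e.2.length + 2 * ((PySem.Set.update e.2 (pvKeys sup)).length - e.2.length)
          ≤ e.2.length + 2 * (e.2.length + sup.length) + 1 := by
        have h1 : (PySem.Set.update e.2 (pvKeys sup)).length
            ≤ e.2.length + (pvKeys sup).length := by
          rw [PySem.Set.update_eq_append_filter, List.length_append]
          have := List.length_filter_le (fun y => !(PySem.Set.contains e.2 y))
            (PySem.Set.ofList (pvKeys sup))
          have := PySem.Set.length_ofList_le (pvKeys sup)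
          omega
        omega
      obtain ⟨w1, w2, w3, w4⟩ := pv_worklist_spec hnd hval procA hclosed e.2 hseedk
        (e.2.length + 2 * (e.2.length + sup.length) + 1) e.2 e.2 procA
        hnodupl hnodupl (fun x hx => hx) hseedk
        (fun x hx => ⟨x, hx, Relation.ReflTransGen.refl⟩) (fun s hs => hs) hdisj
        (fun x hx hnx => absurd hx hnx)
        (fun x => ⟨fun hx => Or.inl hx, fun h => by
          rcases h with h | ⟨h1, h2⟩
          · exact h
          · exact absurd h1 h2⟩)
        hfuel
      set gp := pvWorklist sup (pvNts sup)
        (e.2.length + 2 * (e.2.length + sup.length) + 1) e.2 e.2 procA with hgp_def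
      obtain ⟨s1, s2⟩ := pv_saturate_spec hnd e.2 (e.2.length + sup.length + 1) e.2
        hnodupl (fun s hs => hs) (fun x hx => ⟨x, hx, Relation.ReflTransGen.refl⟩)
        hseedk (by omega)
      set comp := pvSaturate sup (e.2.length + sup.length + 1) e.2 with hcomp_def
      have hmemgc : ∀ x, x ∈ gp.1 ↔ x ∈ comp := fun x => (w1 x).trans (s1 x).symm
      have hname : PySem.List.sorted comp (fun x => x) false
          = PySem.List.sorted gp.1 (fun x => x) false :=
        pv_sorted_eq s2 w3 (fun x => (hmemgc x).symm)
      -- A keeps the group: it has ≥ 2 elements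
      have hglen2 : 1 < gp.1.length := by
        obtain ⟨t1, l'', hl'⟩ : ∃ t1 l'', l' = t1 :: l'' := by
          cases hll : l' with
          | nil => rw [hl, hll] at hlen; simp at hlen
          | cons a b => exact ⟨a, b, rfl⟩
        have ht1mem : t1 ∈ e.2 := by rw [hl, hl']; simp
        have hne : t0 ≠ t1 := by
          rw [hl, hl'] at hnodupl
          intro hq
          exact (List.nodup_cons.mp hnodupl).1 (hq ▸ List.mem_cons_self)
        exact pv_one_lt_length w3 ((w1 t0).mpr ⟨t0, ht0mem, Relation.ReflTransGen.refl⟩)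
          ((w1 t1).mpr ⟨t1, ht1mem, Relation.ReflTransGen.refl⟩) hne
      rw [if_pos hglen2, hname]
      -- new invariants
      have hPE' : ∀ x, x ∈ gp.2 ↔ x ∈ PySem.Set.update emB comp := by
        intro x
        rw [w2 x, PySem.Set.mem_update]
        exact or_congr (hPE x) (hmemgc x)
      have hclosed' : ∀ x ∈ gp.2, ∀ y, pvR sup x y → y ∈ gp.2 := by
        intro x hx y hxy
        rcases (w2 x).mp hx with h | h
        · exact (w2 y).mpr (Or.inl (hclosed x h y hxy))
        · obtain ⟨s, hsm, hpath⟩ := (w1 x).mp h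
          exact (w2 y).mpr (Or.inr ((w1 y).mpr ⟨s, hsm, hpath.tail hxy⟩))
      have hkeys' : ∀ x ∈ gp.2, x ∈ pvKeys sup := by
        intro x hx
        rcases (w2 x).mp hx with h | h
        · exact hkeys x h
        · exact w4 x h
      obtain ⟨Δ', d1, d2, d3, d4, d5, d6, d7, d8⟩ := ih hrest' (gs0 ++ [gp.1]) gp.2
        (PySem.Set.update emB comp)
        (outB.insert (PySem.Str.join "_" (PySem.List.sorted gp.1 (fun x => x) false))
          ((PySem.List.sorted gp.1 (fun x => x) false).foldl
            (fun m n => PySem.Set.update m (pvVal sup n)) (PySem.Set.empty : PySem.Set Int)))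
        hPE' hclosed' hkeys'
      refine ⟨gp.1 :: Δ', ?_, ?_, d3, d4, d5, ?_, ?_, ?_⟩
      · rw [d1, List.append_assoc]
        rfl
      · rw [d2]
        rfl
      · intro e' he' t ht
        rcases List.mem_cons.mp he' with rfl | he''
        · exact d7 t ((w2 t).mpr (Or.inr ((w1 t).mpr ⟨t, ht, Relation.ReflTransGen.refl⟩)))
        · exact d6 e' he'' t ht
      · intro x hx
        exact d7 x ((w2 x).mpr (Or.inl hx))
      · intro x hx
        rcases d8 x hx with h | ⟨e', he', hr⟩
        · rcases (w2 x).mp h with h' | h'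
          · exact Or.inl h'
          · exact Or.inr ⟨e, List.mem_cons_self, (w1 x).mp h'⟩
        · exact Or.inr ⟨e', List.mem_cons_of_mem _ he', hr⟩



-- ===== VERDICT (by name: the statement is the Claim_ definition above) =====
theorem merge_supernodes_py_spec : Claim_equal_merge_supernodes_py := by
  intro sup hdom hpre
  obtain ⟨hnd, hval⟩ := hpre
  unfold Spec_merge_supernodes_py
  simp only [merge_supernodes_py, merge_supernodes_py_alt]
  by_cases hemp : (pvDupItems sup).isEmpty
  · rw [if_pos hemp, if_pos hemp]
  · rw [if_neg hemp, if_neg hemp]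
    obtain ⟨Δ, hA1, hB1, hIff, hClosed, hKeys, hE3, hMono, hE5⟩ :=
      pv_fold_joint hnd hval (pvDupItems sup) (fun e he => he) [] PySem.Set.empty
        PySem.Set.empty
        (PySem.Dict.mk (sup.filter (fun kv => !(PySem.Set.contains
          ((pvDupItems sup).foldl (fun s nd => PySem.Set.update s nd.2)
            (PySem.Set.empty : PySem.Set String)) kv.1))))
        (fun x => Iff.rfl)
        (by intro x hx; simp [PySem.Set.empty] at hx)
        (by intro x hx; simp [PySem.Set.empty] at hx)
    have hga : ((pvDupItems sup).foldl (fun st nd =>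
        if nd.2.any (fun s => PySem.Set.contains st.2 s) then st
        else
          let gp := pvWorklist sup (pvNts sup) (nd.2.length + 2 * (nd.2.length + sup.length) + 1)
                      (PySem.Set.ofList nd.2) (PySem.Set.ofList nd.2) st.2
          if 1 < gp.1.length then (st.1 ++ [gp.1], gp.2) else (st.1, gp.2))
        (([] : List (PySem.Set String)), PySem.Set.empty)) = pvGroupsA sup := rfl
    rw [hga] at hA1 hIff hE3 hE5
    have hproc_iff : ∀ x, x ∈ (pvGroupsA sup).2 ↔
        x ∈ (pvDupItems sup).foldl (fun s nd => PySem.Set.update s nd.2)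
          (PySem.Set.empty : PySem.Set String) := by
      intro x
      rw [pv_mergedIds_mem]
      constructor
      · intro hx
        rcases hE5 x hx with h | ⟨e', he', hr⟩
        · simp [PySem.Set.empty] at h
        · exact pvReach_mem_dup hnd hval he' hr
      · rintro ⟨nd, hnd', hx⟩
        exact hE3 nd hnd' x hx
    have hfilter_eq : sup.filter (fun kv => !(PySem.Set.contains (pvGroupsA sup).2 kv.1))
        = sup.filter (fun kv => !(PySem.Set.contains
            ((pvDupItems sup).foldl (fun s nd => PySem.Set.update s nd.2)
              (PySem.Set.empty : PySem.Set String)) kv.1)) := by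
      apply List.filter_congr
      intro kv _
      have h1 := hproc_iff kv.1
      by_cases h : kv.1 ∈ (pvGroupsA sup).2
      · rw [(PySem.Set.contains_iff _ _).mpr h, (PySem.Set.contains_iff _ _).mpr (h1.mp h)]
      · have hc1 : PySem.Set.contains (pvGroupsA sup).2 kv.1 = false := by
          rw [← Bool.not_eq_true, PySem.Set.contains_iff]; exact h
        have hc2 : PySem.Set.contains ((pvDupItems sup).foldl
            (fun s nd => PySem.Set.update s nd.2) (PySem.Set.empty : PySem.Set String))
            kv.1 = false := by
          rw [← Bool.not_eq_true, PySem.Set.contains_iff]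
          exact fun hm => h (h1.mpr hm)
        rw [hc1, hc2]
    have hinit : sup.foldl (fun d kv => if PySem.Set.contains (pvGroupsA sup).2 kv.1 then d
        else d.insert kv.1 kv.2) PySem.Dict.empty
        = PySem.Dict.mk (sup.filter (fun kv => !(PySem.Set.contains
            ((pvDupItems sup).foldl (fun s nd => PySem.Set.update s nd.2)
              (PySem.Set.empty : PySem.Set String)) kv.1))) := by
      rw [PySem.List.foldl_congr_mem sup _
        (fun d kv => if (!(PySem.Set.contains (pvGroupsA sup).2 kv.1)) = true
          then d.insert kv.1 kv.2 else d) _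
        (by intro acc x _
            cases h : PySem.Set.contains (pvGroupsA sup).2 x.1 <;> simp only [h] <;> rfl)]
      rw [PySem.List.foldl_if_eq_foldl_filter]
      rw [hfilter_eq]
      apply PySem.Dict.ext
      rw [PySem.Dict.items_foldl_insert_fresh _ Prod.fst Prod.snd PySem.Dict.empty
        (fun a _ => PySem.Dict.contains_empty _)
        (List.Nodup.sublist (List.Sublist.map Prod.fst List.filter_sublist) hnd)]
      simp [PySem.Dict.empty]
    rw [hA1, List.nil_append, hinit]
    rw [PySem.List.foldl_congr_mem Δ _
      (fun d g => d.insert (pvEmit sup g).1 (pvEmit sup g).2) _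
      (by intro acc g _; rfl)]
    rw [hB1]
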